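-- pv_equiv track=rewrite | github.com/ErtugrulKaplanoglu/English-Turkish-Translation-Project | bpe_tokenize.py | _merge_once
-- ===== SOURCE A (Python) =====
-- def _merge_once(pair, vocab_symbols):
--
--     a, b = pair
--     merged = a + b
--
--     new_vocab = {}
--     for symbols, freq in vocab_symbols.items():
--         symbols = list(symbols)
--         i = 0
--         new_seq = []
--
--         while i < len(symbols):
--             if i < len(symbols) - 1 and symbols[i] == a and symbols[i + 1] == b:
--                 new_seq.append(merged)
--                 i += 2
--             else:
--                 new_seq.append(symbols[i])
--                 i += 1
--
--         new_seq = tuple(new_seq)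
--         new_vocab[new_seq] = new_vocab.get(new_seq, 0) + freq
--
--     return new_vocab
-- ===== SOURCE B (Python) =====
-- def _merge_once(pair, vocab_symbols):
--     # One forward pass per sequence with a 'pending first symbol' carry flag,
--     # instead of an index loop with lookahead.
--     a, b = pair
--     merged = a + b
--
--     new_vocab = {}
--     for symbols, freq in vocab_symbols.items():
--         out = []
--         pending = False  # True iff the previous symbol was `a` and is not yet emitted
--         for tok in symbols:
--             if pending:
--                 if tok == b:
--                     out.append(merged)
--                     pending = False
--                 elif tok == a:
--                     out.append(a)  # emit the old pending `a`, keep this one pending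
--                 else:
--                     out.append(a)
--                     out.append(tok)
--                     pending = False
--             elif tok == a:
--                 pending = True
--             else:
--                 out.append(tok)
--         if pending:
--             out.append(a)
--
--         key = tuple(out)
--         new_vocab[key] = new_vocab.get(key, 0) + freq
--
--     return new_vocab
-- ===== Notes on version B (the rewrite author's own statement) =====
-- stated objective: alternative
-- what changed: Replaces A's index-based while-loop with one-step lookahead (symbols[i], symbols[i+1]) by a single forward pass over each sequence that carries a 'pending first symbol' flag, emitting the merged token when the second half arrives; Pre_ excludes association lists with duplicate keys, which do not represent any Python dict (A's parameter is a dict).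
import Mathlib
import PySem

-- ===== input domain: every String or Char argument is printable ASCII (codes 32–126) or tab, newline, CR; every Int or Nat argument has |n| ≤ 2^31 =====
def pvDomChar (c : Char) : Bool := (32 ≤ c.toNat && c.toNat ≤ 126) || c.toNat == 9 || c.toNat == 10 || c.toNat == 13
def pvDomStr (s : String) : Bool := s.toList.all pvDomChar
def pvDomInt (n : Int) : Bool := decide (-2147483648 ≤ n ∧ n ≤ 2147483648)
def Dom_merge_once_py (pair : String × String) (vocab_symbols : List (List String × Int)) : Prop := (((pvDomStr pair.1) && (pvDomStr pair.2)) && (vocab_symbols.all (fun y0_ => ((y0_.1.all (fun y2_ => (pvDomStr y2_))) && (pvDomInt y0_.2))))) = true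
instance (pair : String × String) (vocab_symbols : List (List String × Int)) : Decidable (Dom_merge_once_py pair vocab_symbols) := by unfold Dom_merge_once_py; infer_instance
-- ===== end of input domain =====

-- B replaces A's index loop with lookahead by a single forward fold carrying a
-- 'pending `a`' flag (alternative decomposition, same cost); return values proved equal.

-- ===== PORT A =====
-- A's inner while-loop: index i, appends to new_seq; symbols[i] accessed only
-- under the guard i < len, so getD is exact here.
def pvLoopA (a b merged : String) (symbols : List String) (i : Nat) (new_seq : List String) : List String :=
  if _h : i < symbols.length then
    if i < symbols.length - 1 ∧ symbols.getD i "" = a ∧ symbols.getD (i + 1) "" = b then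
      pvLoopA a b merged symbols (i + 2) (new_seq ++ [merged])
    else
      pvLoopA a b merged symbols (i + 1) (new_seq ++ [symbols.getD i ""])
  else new_seq
termination_by symbols.length - i

def merge_once_py (pair : String × String) (vocab_symbols : List (List String × Int)) : List (List String × Int) :=
  let a := pair.1
  let b := pair.2
  let merged := a ++ b
  (vocab_symbols.foldl
    (fun new_vocab sf =>
      let new_seq := pvLoopA a b merged sf.1 0 []
      new_vocab.insert new_seq (new_vocab.getD new_seq 0 + sf.2))
    (PySem.Dict.empty : PySem.Dict (List String) Int)).items

-- ===== PORT B =====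
def pvStepB (a b merged : String) (st : List String × Bool) (tok : String) : List String × Bool :=
  if st.2 then
    if tok = b then (st.1 ++ [merged], false)
    else if tok = a then (st.1 ++ [a], true)
    else (st.1 ++ [a, tok], false)
  else if tok = a then (st.1, true)
  else (st.1 ++ [tok], false)

def pvMergeSeqB (a b merged : String) (symbols : List String) : List String :=
  let st := symbols.foldl (pvStepB a b merged) ([], false)
  if st.2 then st.1 ++ [a] else st.1

def merge_once_py_alt (pair : String × String) (vocab_symbols : List (List String × Int)) : List (List String × Int) :=
  let a := pair.1
  let b := pair.2
  let merged := a ++ b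
  (vocab_symbols.foldl
    (fun new_vocab sf =>
      let key := pvMergeSeqB a b merged sf.1
      new_vocab.insert key (new_vocab.getD key 0 + sf.2))
    (PySem.Dict.empty : PySem.Dict (List String) Int)).items

-- ===== PRECONDITION & SPEC =====
-- Pre_ excludes association lists with duplicate keys: they do not represent any
-- Python dict (A's vocab_symbols parameter is a dict, whose keys are unique).
def Pre_merge_once_py (pair : String × String) (vocab_symbols : List (List String × Int)) : Prop :=
  (vocab_symbols.map Prod.fst).Nodup
instance (pair : String × String) (vocab_symbols : List (List String × Int)) : Decidable (Pre_merge_once_py pair vocab_symbols) := by unfold Pre_merge_once_py; infer_instance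

def pvWitness_merge_once_py : (String × String) × (List (List String × Int)) :=
  (("a", "b"), [(["a", "b", "c"], 2), (["a", "a", "b"], 1)])

def Spec_merge_once_py (pair : String × String) (vocab_symbols : List (List String × Int)) (out : List (List String × Int)) : Prop := out = merge_once_py_alt pair vocab_symbols
instance (pair : String × String) (vocab_symbols : List (List String × Int)) (out : List (List String × Int)) : Decidable (Spec_merge_once_py pair vocab_symbols out) := by unfold Spec_merge_once_py; infer_instance

-- ===== CLAIM (what is proved, stated in full; the proofs are below) =====
def Claim_equal_merge_once_py : Prop := ∀ (pair : String × String) (vocab_symbols : List (List String × Int)), Dom_merge_once_py pair vocab_symbols → Pre_merge_once_py pair vocab_symbols → Spec_merge_once_py pair vocab_symbols (merge_once_py pair vocab_symbols)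

-- ===== LEMMAS AND PROOFS =====

-- The common greedy left-to-right one-pass merge, as a structural recursion.
def pvGreedy (a b merged : String) : List String → List String
  | [] => []
  | [x] => [x]
  | x :: y :: r =>
      if x = a ∧ y = b then merged :: pvGreedy a b merged r
      else x :: pvGreedy a b merged (y :: r)

theorem pvGreedy_cons_of_ne (a b merged x : String) (r : List String) (hx : x ≠ a) :
    pvGreedy a b merged (x :: r) = x :: pvGreedy a b merged r := by
  cases r with
  | nil => rfl
  | cons y r => simp [pvGreedy, hx]

theorem pvLoopA_eq (a b merged : String) (symbols : List String) :
    ∀ n i acc, symbols.length - i ≤ n →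
      pvLoopA a b merged symbols i acc = acc ++ pvGreedy a b merged (symbols.drop i) := by
  intro n
  induction n with
  | zero =>
      intro i acc h
      have hi : ¬ i < symbols.length := by omega
      rw [pvLoopA, dif_neg hi, List.drop_of_length_le (by omega), pvGreedy, List.append_nil]
  | succ n ih =>
      intro i acc h
      by_cases hi : i < symbols.length
      · have hget : symbols.getD i "" = symbols[i] := List.getD_eq_getElem _ _ hi
        have hdrop : symbols.drop i = symbols[i] :: symbols.drop (i + 1) :=
          List.drop_eq_getElem_cons hi
        by_cases hc : i < symbols.length - 1 ∧ symbols.getD i "" = a ∧ symbols.getD (i + 1) "" = b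
        · obtain ⟨h1, h2, h3⟩ := hc
          have hi1 : i + 1 < symbols.length := by omega
          have hget1 : symbols.getD (i + 1) "" = symbols[i + 1] := List.getD_eq_getElem _ _ hi1
          have hdrop1 : symbols.drop (i + 1) = symbols[i + 1] :: symbols.drop (i + 2) :=
            List.drop_eq_getElem_cons hi1
          rw [pvLoopA, dif_pos hi, if_pos ⟨h1, h2, h3⟩, ih (i + 2) _ (by omega),
            hdrop, hdrop1, pvGreedy]
          rw [hget] at h2; rw [hget1] at h3
          simp [h2, h3]
        · rw [pvLoopA, dif_pos hi, if_neg hc, ih (i + 1) _ (by omega), hdrop, hget]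
          by_cases hi1 : i + 1 < symbols.length
          · have hget1 : symbols.getD (i + 1) "" = symbols[i + 1] := List.getD_eq_getElem _ _ hi1
            have hdrop1 : symbols.drop (i + 1) = symbols[i + 1] :: symbols.drop (i + 2) :=
              List.drop_eq_getElem_cons hi1
            have hne : ¬ (symbols[i] = a ∧ symbols[i + 1] = b) := by
              intro ⟨ha, hb⟩
              exact hc ⟨by omega, by rw [hget, ha], by rw [hget1, hb]⟩
            rw [hdrop1, pvGreedy, if_neg hne, ← hdrop1]
            simp
          · have : symbols.drop (i + 1) = [] := List.drop_of_length_le (by omega)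
            rw [this, pvGreedy]
            simp [pvGreedy]
      · rw [pvLoopA, dif_neg hi, List.drop_of_length_le (by omega), pvGreedy, List.append_nil]

theorem pvStepB_eq (a b merged : String) :
    ∀ (l acc : List String) (p : Bool),
      (let st := l.foldl (pvStepB a b merged) (acc, p); if st.2 then st.1 ++ [a] else st.1)
      = acc ++ pvGreedy a b merged (if p then a :: l else l) := by
  intro l
  induction l with
  | nil =>
      intro acc p
      cases p <;> simp [pvGreedy]
  | cons t r ih =>
      intro acc p
      cases p with
      | false =>
          by_cases ht : t = a
          · simp only [List.foldl_cons, pvStepB, if_neg (Bool.false_ne_true), ht, if_true]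
            exact ih acc true
          · simp only [List.foldl_cons, pvStepB, if_neg ht, if_neg (Bool.false_ne_true)]
            rw [ih (acc ++ [t]) false, pvGreedy_cons_of_ne a b merged t r ht]
            simp
      | true =>
          by_cases htb : t = b
          · simp only [List.foldl_cons, pvStepB, if_pos htb, if_true]
            rw [ih (acc ++ [merged]) false]
            simp [pvGreedy, htb]
          · by_cases hta : t = a
            · simp only [List.foldl_cons, pvStepB, if_neg htb, if_pos hta, if_true]
              rw [ih (acc ++ [a]) true]
              have h2 : pvGreedy a b merged (a :: t :: r) = a :: pvGreedy a b merged (t :: r) := by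
                rw [pvGreedy, if_neg (by tauto)]
              have h3 : pvGreedy a b merged (a :: r) = pvGreedy a b merged (t :: r) := by rw [hta]
              simp [h2, h3]
            · simp only [List.foldl_cons, pvStepB, if_neg htb, if_neg hta, if_true]
              rw [ih (acc ++ [a, t]) false]
              have : pvGreedy a b merged (a :: t :: r) = a :: t :: pvGreedy a b merged r := by
                rw [pvGreedy, if_neg (by tauto), pvGreedy_cons_of_ne a b merged t r hta]
              simp [this]

theorem pvMergeSeqB_eq_pvGreedy (a b merged : String) (l : List String) :
    pvMergeSeqB a b merged l = pvGreedy a b merged l := by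
  have h := pvStepB_eq a b merged l [] false
  simpa [pvMergeSeqB] using h

theorem pvLoopA_eq_pvMergeSeqB (a b merged : String) (l : List String) :
    pvLoopA a b merged l 0 [] = pvMergeSeqB a b merged l := by
  rw [pvLoopA_eq a b merged l l.length 0 [] (by omega), pvMergeSeqB_eq_pvGreedy]
  simp

-- ===== VERDICT (by name: the statement is the Claim_ definition above) =====
theorem merge_once_py_spec : Claim_equal_merge_once_py := by
  intro pair vocab_symbols _ _
  unfold Spec_merge_once_py merge_once_py merge_once_py_alt
  simp only [pvLoopA_eq_pvMergeSeqB]
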